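-- pv_equiv track=rewrite | github.com/SH2609/Spring-Semester-2021-DSA-Codes | st06862_sh06897_HW3.py | get_secondary_connections
-- ===== SOURCE A (Python) =====
-- def get_secondary_connections(network, user):
--     if user not in network[0]:
--         return None
--     if network[0][user]==[]:
--         return []
--     primary_connections=network[0][user]
--     secondary_connections=[]
--     for prim_conn in primary_connections:
--         for sec_conn in network[0][prim_conn]:
--             if not sec_conn in secondary_connections:
--                 secondary_connections.append(sec_conn)
--     return secondary_connections
-- ===== SOURCE B (Python) =====
-- def get_secondary_connections(network, user):
--     directory = network[0]
--     if user not in directory: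
--         return None
--     # gather pass: all secondary connections in traversal order
--     flat = []
--     for p in directory[user]:
--         flat.extend(directory[p])
--     # filter-ahead dedup: repeatedly emit the head and delete its
--     # remaining duplicates from the rest of the list
--     result = []
--     while flat:
--         head = flat[0]
--         result.append(head)
--         flat = [x for x in flat[1:] if x != head]
--     return result
-- ===== Notes on version B (the rewrite author's own statement) =====
-- stated objective: alternative
-- what changed: Replaces A's check-behind dedup (membership test against the growing result inside the nested loop) with a separate gather pass followed by a filter-ahead dedup loop that repeatedly emits the head and deletes its remaining duplicates from the rest of the list.
import Mathlib
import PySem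

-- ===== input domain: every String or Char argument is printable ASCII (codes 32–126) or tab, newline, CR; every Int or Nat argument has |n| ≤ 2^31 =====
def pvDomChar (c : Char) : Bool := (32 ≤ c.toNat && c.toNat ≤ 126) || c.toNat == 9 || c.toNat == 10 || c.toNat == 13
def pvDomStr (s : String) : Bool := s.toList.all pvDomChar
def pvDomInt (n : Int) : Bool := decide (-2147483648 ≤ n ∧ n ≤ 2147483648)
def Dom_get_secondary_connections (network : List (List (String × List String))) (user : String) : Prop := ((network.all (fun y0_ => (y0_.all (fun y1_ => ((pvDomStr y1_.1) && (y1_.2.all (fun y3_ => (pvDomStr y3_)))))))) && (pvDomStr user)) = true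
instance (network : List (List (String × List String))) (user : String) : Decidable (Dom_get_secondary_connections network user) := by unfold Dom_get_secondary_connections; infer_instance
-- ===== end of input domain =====

-- ===== PORT A =====
-- B replaces A's check-behind dedup (membership test against the growing result) with a gather
-- pass plus a filter-ahead dedup loop (alternative decomposition; return-value equivalence).
def get_secondary_connections (network : List (List (String × List String))) (user : String) : Option (List String) :=
  match network.head? with
  | none => none  -- network[0] raises IndexError; excluded by Pre_
  | some d =>
    match List.lookup user d with
    | none => none
    | some prim =>
      if prim = [] then some []
      else
        some (prim.foldl (fun acc p =>
          -- network[0][prim_conn]: KeyError when missing is excluded by Pre_, so getD [] is exact under Pre_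
          ((List.lookup p d).getD []).foldl
            (fun acc2 s => if s ∈ acc2 then acc2 else acc2 ++ [s]) acc) [])

-- ===== PORT B =====
-- B's while loop: emit the head, delete its duplicates from the rest, repeat.
def pvDedupLoop (result xs : List String) : List String :=
  match xs with
  | [] => result
  | h :: t => pvDedupLoop (result ++ [h]) (t.filter (fun x => x ≠ h))
termination_by xs.length
decreasing_by
  simp
  exact le_trans (List.length_filter_le _ _) (by simp)

def get_secondary_connections_alt (network : List (List (String × List String))) (user : String) : Option (List String) :=
  match network.head? with
  | none => none  -- network[0] raises IndexError; excluded by Pre_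
  | some d =>
    match List.lookup user d with
    | none => none
    | some prim =>
      -- gather pass (flat.extend(directory[p]); getD [] exact under Pre_)
      let flat := prim.foldl (fun acc p => acc ++ ((List.lookup p d).getD [])) []
      -- filter-ahead dedup loop
      some (pvDedupLoop [] flat)

-- ===== PRECONDITION & SPEC =====
-- Pre_ excludes exactly the inputs where the Python A raises: empty network (IndexError on
-- network[0]) and a primary connection missing from network[0] (KeyError).
def Pre_get_secondary_connections (network : List (List (String × List String))) (user : String) : Prop :=
  network ≠ [] ∧
  (∀ d ∈ network.head?, ∀ prim ∈ List.lookup user d, ∀ p ∈ prim, (List.lookup p d).isSome = true)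
instance (network : List (List (String × List String))) (user : String) : Decidable (Pre_get_secondary_connections network user) := by unfold Pre_get_secondary_connections; infer_instance

def pvWitness_get_secondary_connections : (List (List (String × List String))) × String :=
  ([[("alice", ["bob", "carol"]), ("bob", ["alice"]), ("carol", ["bob"])]], "alice")

def Spec_get_secondary_connections (network : List (List (String × List String))) (user : String) (out : Option (List String)) : Prop := out = get_secondary_connections_alt network user
instance (network : List (List (String × List String))) (user : String) (out : Option (List String)) : Decidable (Spec_get_secondary_connections network user out) := by unfold Spec_get_secondary_connections; infer_instance

-- ===== CLAIM (what is proved, stated in full; the proofs are below) =====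
def Claim_equal_get_secondary_connections : Prop := ∀ (network : List (List (String × List String))) (user : String), Dom_get_secondary_connections network user → Pre_get_secondary_connections network user → Spec_get_secondary_connections network user (get_secondary_connections network user)

-- ===== LEMMAS AND PROOFS =====

-- proof-side recursive form of the filter-ahead dedup
def pvDedupF (xs : List String) : List String :=
  match xs with
  | [] => []
  | h :: t => h :: pvDedupF (t.filter (fun x => x ≠ h))
termination_by xs.length
decreasing_by
  simp
  exact le_trans (List.length_filter_le _ _) (by simp)

theorem pvDedupF_cons (h : String) (t : List String) :
    pvDedupF (h :: t) = h :: pvDedupF (t.filter (fun x => x ≠ h)) := by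
  rw [pvDedupF]

theorem pvDedupLoop_cons (result : List String) (h : String) (t : List String) :
    pvDedupLoop result (h :: t) = pvDedupLoop (result ++ [h]) (t.filter (fun x => x ≠ h)) := by
  rw [pvDedupLoop]

theorem pvDedupLoop_eq_aux :
    ∀ (n : Nat) (xs : List String), xs.length ≤ n →
      ∀ (result : List String), pvDedupLoop result xs = result ++ pvDedupF xs := by
  intro n
  induction n with
  | zero =>
    intro xs hx result
    have : xs = [] := List.eq_nil_of_length_eq_zero (Nat.le_zero.mp hx)
    subst this
    simp [pvDedupLoop, pvDedupF]
  | succ n ih =>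
    intro xs hx result
    cases xs with
    | nil => simp [pvDedupLoop, pvDedupF]
    | cons h t =>
      rw [pvDedupLoop_cons, pvDedupF_cons]
      have hlen : (t.filter (fun x => x ≠ h)).length ≤ n := by
        have := List.length_filter_le (fun x => decide (x ≠ h)) t
        simp only [List.length_cons, Nat.succ_le_succ_iff] at hx
        omega
      rw [ih _ hlen]
      simp

theorem pvDedupLoop_eq (result xs : List String) :
    pvDedupLoop result xs = result ++ pvDedupF xs :=
  pvDedupLoop_eq_aux xs.length xs (Nat.le_refl _) result

-- B's gather fold is the flatMap of the lookups
theorem gather_eq_flatMap (f : String → List String) :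
    ∀ (prim : List String) (acc : List String),
      prim.foldl (fun a p => a ++ f p) acc = acc ++ prim.flatMap f := by
  intro prim
  induction prim with
  | nil => simp
  | cons p ps ih => intro acc; simp [ih]

-- A's membership-append step over a flattened list equals A's nested loop.
theorem foldl_ins_flatMap (f : String → List String) :
    ∀ (prim : List String) (acc : List String),
      prim.foldl (fun acc p =>
        (f p).foldl (fun acc2 s => if s ∈ acc2 then acc2 else acc2 ++ [s]) acc) acc
      = (prim.flatMap f).foldl (fun acc2 s => if s ∈ acc2 then acc2 else acc2 ++ [s]) acc := by
  intro prim
  induction prim with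
  | nil => intro acc; rfl
  | cons p ps ih =>
    intro acc
    simp [List.flatMap_cons, List.foldl_append, ih]

-- A's check-behind fold equals acc followed by the filter-ahead dedup of the unseen elements.
theorem ins_foldl_eq_dedupF :
    ∀ (flat acc : List String),
      flat.foldl (fun acc2 s => if s ∈ acc2 then acc2 else acc2 ++ [s]) acc
      = acc ++ pvDedupF (flat.filter (fun x => decide (x ∉ acc))) := by
  intro flat
  induction flat with
  | nil => intro acc; simp [pvDedupF]
  | cons x xs ih =>
    intro acc
    by_cases hx : x ∈ acc
    · simp only [List.foldl_cons, List.filter_cons, hx, not_true, decide_false, if_true,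
        if_false, Bool.false_eq_true]
      exact ih acc
    · simp only [List.foldl_cons, List.filter_cons, hx, not_false_iff, decide_true, if_true, if_false]
      rw [ih (acc ++ [x]), pvDedupF]
      simp only [List.append_assoc, List.singleton_append, List.filter_filter]
      congr 3
      apply List.filter_congr
      intro y _
      simp only [List.mem_append, List.mem_singleton]
      by_cases h1 : y = x <;> by_cases h2 : y ∈ acc <;> simp [h1, h2]

-- ===== VERDICT (by name: the statement is the Claim_ definition above) =====
theorem get_secondary_connections_spec : Claim_equal_get_secondary_connections := by
  intro network user _ _
  unfold Spec_get_secondary_connections get_secondary_connections get_secondary_connections_alt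
  cases network with
  | nil => rfl
  | cons d rest =>
    simp only [List.head?_cons]
    cases List.lookup user d with
    | none => rfl
    | some prim =>
      simp only
      rw [gather_eq_flatMap, pvDedupLoop_eq]
      by_cases hp : prim = []
      · simp [hp, pvDedupF]
      · simp only [if_neg hp, List.nil_append]
        rw [foldl_ins_flatMap, ins_foldl_eq_dedupF]
        simp
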